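-- pv_equiv track=rewrite | github.com/Eslam-Elsawy/Ling573Project | src/run_on_patas/entitybasedreranker.py | buildPermutationsRec
-- ===== SOURCE A (Python) =====
-- def buildPermutationsRec(sent_len_dic, current_len, history, history_str):
--
--     found_longer = False
--     perms = []
--     for key in sent_len_dic:
--         if key not in history and current_len + sent_len_dic[key] <= 100:
--             found_longer = True
--             new_history = list(history)
--             new_history.append(key)
--             new_history_str = ','.join(str(x) for x in new_history)
--             perms = perms + buildPermutationsRec(sent_len_dic, current_len + sent_len_dic[key], new_history, new_history_str)
--
--     if found_longer:
--         return perms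
--     else:
--         return [history_str]
-- ===== SOURCE B (Python) =====
-- def buildPermutationsRec(sent_len_dic, current_len, history, history_str):
--     # Iterative DFS with an explicit stack instead of recursion: pop a state,
--     # compute its viable children; a childless state emits its string, otherwise
--     # the children are pushed in reverse so the stack replays the same
--     # left-to-right pre-order the recursive version produces.
--     keys = list(sent_len_dic)
--     results = []
--     stack = [(current_len, list(history), history_str)]
--     while stack:
--         cl, hist, s = stack.pop()
--         children = [k for k in keys
--                     if k not in hist and cl + sent_len_dic[k] <= 100]
--         if not children:
--             results.append(s)
--         else:
--             for k in reversed(children):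
--                 nh = hist + [k]
--                 stack.append((cl + sent_len_dic[k], nh,
--                               ','.join(str(x) for x in nh)))
--     return results
-- ===== Notes on version B (the rewrite author's own statement) =====
-- stated objective: alternative
-- what changed: A's recursion is replaced by an iterative DFS over an explicit stack of (length, history, string) states with a results accumulator; children are pushed in reverse so popping reproduces A's left-to-right pre-order output, and a popped state with no viable children emits its string.
import Mathlib
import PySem

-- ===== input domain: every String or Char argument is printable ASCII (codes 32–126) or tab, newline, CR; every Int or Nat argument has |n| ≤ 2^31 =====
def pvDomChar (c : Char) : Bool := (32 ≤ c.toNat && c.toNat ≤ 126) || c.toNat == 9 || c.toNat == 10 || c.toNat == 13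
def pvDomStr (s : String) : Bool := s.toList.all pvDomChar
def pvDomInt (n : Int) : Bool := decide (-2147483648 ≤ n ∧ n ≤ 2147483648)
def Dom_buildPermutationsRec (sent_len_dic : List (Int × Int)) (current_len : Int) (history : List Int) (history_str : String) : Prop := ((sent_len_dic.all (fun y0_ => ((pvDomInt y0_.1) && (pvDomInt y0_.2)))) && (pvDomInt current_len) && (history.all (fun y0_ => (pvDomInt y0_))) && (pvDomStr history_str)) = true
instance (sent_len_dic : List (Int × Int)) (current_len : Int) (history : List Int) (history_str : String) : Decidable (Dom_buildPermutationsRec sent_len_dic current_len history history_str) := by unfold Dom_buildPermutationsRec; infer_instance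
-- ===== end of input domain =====

-- B replaces A's recursion by an iterative DFS over an explicit stack of (length, history,
-- string) states, pushing children in reverse so the pre-order output is identical
-- (objective: alternative decomposition; return values proved equal).

-- ','.join(str(x) for x in l)
def pvJoin (l : List Int) : String := PySem.Str.join "," (l.map (fun x => PySem.Int.toStr x))

-- termination helper for port A: appending a fresh key to history shrinks the unused-key count
theorem pv_filter_lt {l hist : List Int} {k : Int} (hk : k ∈ l) (hkh : k ∉ hist) :
    (l.filter (fun x => !(hist ++ [k]).contains x)).length <
      (l.filter (fun x => !hist.contains x)).length := by
  have hsub : l.filter (fun x => !(hist ++ [k]).contains x)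
      = (l.filter (fun x => !hist.contains x)).filter (fun x => !(x == k)) := by
    rw [List.filter_filter]
    apply List.filter_congr
    intro x _
    simp [beq_eq_decide, eq_comm, Bool.and_comm]
  rw [hsub]
  rw [List.length_filter_lt_length_iff_exists]
  exact ⟨k, by simp [hk, hkh]⟩

-- ===== PORT A =====
def buildPermutationsRec (sent_len_dic : List (Int × Int)) (current_len : Int) (history : List Int) (history_str : String) : List String :=
  let st := (PySem.Dict.ofList sent_len_dic).keys.attach.foldl
    (fun (st : Bool × List String) kk =>
      if h : kk.1 ∉ history ∧ current_len + (PySem.Dict.ofList sent_len_dic).getD kk.1 0 ≤ 100 then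
        (true, st.2 ++ buildPermutationsRec sent_len_dic
          (current_len + (PySem.Dict.ofList sent_len_dic).getD kk.1 0)
          (history ++ [kk.1]) (pvJoin (history ++ [kk.1])))
      else st)
    (false, [])
  if st.1 then st.2 else [history_str]
termination_by ((PySem.Dict.ofList sent_len_dic).keys.filter (fun x => !history.contains x)).length
decreasing_by
  exact pv_filter_lt kk.2 h.1

-- ===== PORT B =====
-- children of a node: `[k for k in keys if k not in hist and cl + sent_len_dic[k] <= 100]`
def pvChildren (d : PySem.Dict Int Int) (cl : Int) (hist : List Int) : List Int :=
  d.keys.filter (fun k => !hist.contains k && decide (cl + d.getD k 0 ≤ 100))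

-- the state pushed for child k
def pvChild (d : PySem.Dict Int Int) (cl : Int) (hist : List Int) (k : Int) : Int × List Int × String :=
  (cl + d.getD k 0, hist ++ [k], pvJoin (hist ++ [k]))

-- stack-entry weight and total stack measure, used only for termination of the loop
def pvW (d : PySem.Dict Int Int) (e : Int × List Int × String) : Nat :=
  (d.keys.length + 1) ^ (d.keys.filter (fun x => !e.2.1.contains x)).length

def pvMeasure (d : PySem.Dict Int Int) (stack : List (Int × List Int × String)) : Nat :=
  (stack.map (pvW d)).sum

theorem pv_pow_pos (n u : Nat) : 0 < (n + 1) ^ u :=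
  Nat.pow_pos (Nat.succ_pos n)

-- `for k in reversed(children): stack.append(child(k))` on a head-is-top stack
theorem pv_rev_push {α β : Type} (l : List α) (f : α → β) (rest : List β) :
    l.reverse.foldl (fun st k => f k :: st) rest = l.map f ++ rest := by
  induction l generalizing rest with
  | nil => rfl
  | cons x xs ih => rw [List.reverse_cons, List.foldl_append, ih]; rfl

-- popping an entry strictly decreases the measure
theorem pv_measure_tail_lt (d : PySem.Dict Int Int) (e : Int × List Int × String)
    (rest : List (Int × List Int × String)) :
    pvMeasure d rest < pvMeasure d (e :: rest) :=
  Nat.lt_add_of_pos_left (pv_pow_pos d.keys.length _)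

theorem pv_sum_le_mul (f : Int → Nat) (c : Nat) :
    ∀ l : List Int, (∀ x ∈ l, f x ≤ c) → (l.map f).sum ≤ l.length * c
  | [], _ => Nat.zero_le _
  | x :: t, h =>
    le_trans
      (Nat.add_le_add (h x List.mem_cons_self)
        (pv_sum_le_mul f c t (fun y hy => h y (List.mem_cons_of_mem _ hy))))
      (le_of_eq (by rw [List.length_cons, Nat.succ_mul, Nat.add_comm]))

theorem pv_mem_children {d : PySem.Dict Int Int} {cl : Int} {hist : List Int} {k : Int}
    (h : k ∈ pvChildren d cl hist) : k ∈ d.keys ∧ k ∉ hist := by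
  have h1 := List.mem_of_mem_filter h
  have h2 := List.of_mem_filter h
  simp only [Bool.and_eq_true, Bool.not_eq_eq_eq_not, Bool.not_true, List.contains_eq_mem,
    decide_eq_false_iff_not] at h2
  exact ⟨h1, h2.1⟩

-- each pushed child weighs at most (n+1)^(u-1)
theorem pv_child_w_le (d : PySem.Dict Int Int) (cl : Int) (hist : List Int) (k : Int)
    (h : k ∈ pvChildren d cl hist) :
    pvW d (pvChild d cl hist k)
      ≤ (d.keys.length + 1) ^ ((d.keys.filter (fun x => !hist.contains x)).length - 1) :=
  Nat.pow_le_pow_right (Nat.succ_le_succ (Nat.zero_le _))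
    (Nat.le_sub_one_of_lt (pv_filter_lt (pv_mem_children h).1 (pv_mem_children h).2))

theorem pv_children_len_le (d : PySem.Dict Int Int) (cl : Int) (hist : List Int) :
    (pvChildren d cl hist).length ≤ (d.keys.filter (fun x => !hist.contains x)).length := by
  have hsub : pvChildren d cl hist
      = (d.keys.filter (fun x => !hist.contains x)).filter
          (fun k => decide (cl + d.getD k 0 ≤ 100)) := by
    unfold pvChildren
    rw [List.filter_filter]
    exact List.filter_congr (fun x _ => Bool.and_comm _ _)
  rw [hsub]
  exact List.length_filter_le _ _

-- the pushed children together weigh strictly less than the popped entry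
theorem pv_mul_pow (n u : Nat) (hu : 0 < u) : (n + 1) * (n + 1) ^ (u - 1) = (n + 1) ^ u := by
  conv_rhs => rw [← Nat.sub_add_cancel hu]
  rw [Nat.pow_succ, Nat.mul_comm]

theorem pv_sum_lt (d : PySem.Dict Int Int) (cl : Int) (hist : List Int) (s : String) :
    ((pvChildren d cl hist).map (fun k => pvW d (pvChild d cl hist k))).sum
      < pvW d (cl, hist, s) := by
  cases hC : pvChildren d cl hist with
  | nil => exact pv_pow_pos _ _
  | cons c cs =>
    have hcmem : c ∈ pvChildren d cl hist := by rw [hC]; exact List.mem_cons_self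
    have hu : 0 < (d.keys.filter (fun x => !hist.contains x)).length :=
      List.length_pos_of_mem (List.mem_filter.mpr
        ⟨(pv_mem_children hcmem).1, by
          simp only [Bool.not_eq_eq_eq_not, Bool.not_true, List.contains_eq_mem,
            decide_eq_false_iff_not]
          exact (pv_mem_children hcmem).2⟩)
    calc ((c :: cs).map (fun k => pvW d (pvChild d cl hist k))).sum
        ≤ (c :: cs).length
            * (d.keys.length + 1) ^ ((d.keys.filter (fun x => !hist.contains x)).length - 1) :=
          pv_sum_le_mul _ _ _ (fun k hk => pv_child_w_le d cl hist k (hC ▸ hk))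
      _ ≤ (d.keys.filter (fun x => !hist.contains x)).length
            * (d.keys.length + 1) ^ ((d.keys.filter (fun x => !hist.contains x)).length - 1) :=
          Nat.mul_le_mul_right _ (hC ▸ pv_children_len_le d cl hist)
      _ ≤ d.keys.length
            * (d.keys.length + 1) ^ ((d.keys.filter (fun x => !hist.contains x)).length - 1) :=
          Nat.mul_le_mul_right _ (List.length_filter_le _ _)
      _ < (d.keys.length + 1)
            * (d.keys.length + 1) ^ ((d.keys.filter (fun x => !hist.contains x)).length - 1) :=
          Nat.mul_lt_mul_of_lt_of_le (Nat.lt_succ_self _) (Nat.le_refl _) (pv_pow_pos _ _)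
      _ = pvW d (cl, hist, s) := pv_mul_pow _ _ hu

-- replacing a popped entry by its children strictly decreases the measure
theorem pv_measure_children_lt (d : PySem.Dict Int Int) (cl : Int) (hist : List Int) (s : String)
    (rest : List (Int × List Int × String)) :
    pvMeasure d ((pvChildren d cl hist).map (pvChild d cl hist) ++ rest)
      < pvMeasure d ((cl, hist, s) :: rest) := by
  have happ : pvMeasure d ((pvChildren d cl hist).map (pvChild d cl hist) ++ rest)
      = ((pvChildren d cl hist).map (fun k => pvW d (pvChild d cl hist k))).sum
          + pvMeasure d rest := by
    unfold pvMeasure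
    rw [List.map_append, List.sum_append, List.map_map]
    rfl
  rw [happ]
  exact Nat.add_lt_add_right (pv_sum_lt d cl hist s) _

-- the while-stack loop of B (head of `stack` is the top)
def pvLoop (d : PySem.Dict Int Int) (stack : List (Int × List Int × String)) (acc : List String) : List String :=
  match stack with
  | [] => acc
  | (cl, hist, s) :: rest =>
      let children := pvChildren d cl hist
      if children.isEmpty then
        pvLoop d rest (acc ++ [s])
      else
        pvLoop d (children.reverse.foldl (fun st k => pvChild d cl hist k :: st) rest) acc
termination_by pvMeasure d stack
decreasing_by
  · exact pv_measure_tail_lt d _ rest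
  · rw [pv_rev_push]; exact pv_measure_children_lt d cl hist s rest

def buildPermutationsRec_alt (sent_len_dic : List (Int × Int)) (current_len : Int) (history : List Int) (history_str : String) : List String :=
  pvLoop (PySem.Dict.ofList sent_len_dic) [(current_len, history, history_str)] []

-- ===== PRECONDITION & SPEC =====
def Spec_buildPermutationsRec (sent_len_dic : List (Int × Int)) (current_len : Int) (history : List Int) (history_str : String) (out : List String) : Prop := out = buildPermutationsRec_alt sent_len_dic current_len history history_str
instance (sent_len_dic : List (Int × Int)) (current_len : Int) (history : List Int) (history_str : String) (out : List String) : Decidable (Spec_buildPermutationsRec sent_len_dic current_len history history_str out) := by unfold Spec_buildPermutationsRec; infer_instance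

-- ===== CLAIM (what is proved, stated in full; the proofs are below) =====
def Claim_equal_buildPermutationsRec : Prop := ∀ (sent_len_dic : List (Int × Int)) (current_len : Int) (history : List Int) (history_str : String), Dom_buildPermutationsRec sent_len_dic current_len history history_str → Spec_buildPermutationsRec sent_len_dic current_len history history_str (buildPermutationsRec sent_len_dic current_len history history_str)

-- ===== LEMMAS AND PROOFS =====

theorem pv_foldl_flag (l : List Int) (p : Int → Prop) [DecidablePred p] (f : Int → List String)
    (b : Bool) (acc : List String) :
    (l.foldl (fun (st : Bool × List String) k => if p k then (true, st.2 ++ f k) else st) (b, acc))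
    = (b || !(l.filter (fun k => decide (p k))).isEmpty,
       acc ++ (l.filter (fun k => decide (p k))).flatMap f) := by
  induction l generalizing b acc with
  | nil => simp
  | cons x xs ih =>
    by_cases hx : p x
    · simp [hx, ih]
    · simp [hx, ih]

-- A's usable keys coincide with B's children list
theorem pv_K_eq_children (sent_len_dic : List (Int × Int)) (cl : Int) (hist : List Int) :
    (PySem.Dict.ofList sent_len_dic).keys.filter
      (fun k => decide (k ∉ hist ∧ cl + (PySem.Dict.ofList sent_len_dic).getD k 0 ≤ 100))
    = pvChildren (PySem.Dict.ofList sent_len_dic) cl hist := by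
  unfold pvChildren
  apply List.filter_congr
  intro x _
  simp

-- closed form of A's recursion: childless nodes emit the string, otherwise concatenate children
theorem pv_A_eq (sent_len_dic : List (Int × Int)) (cl : Int) (hist : List Int) (hs : String) :
    buildPermutationsRec sent_len_dic cl hist hs
    = if (pvChildren (PySem.Dict.ofList sent_len_dic) cl hist).isEmpty then [hs]
      else (pvChildren (PySem.Dict.ofList sent_len_dic) cl hist).flatMap
        (fun k => buildPermutationsRec sent_len_dic
          (cl + (PySem.Dict.ofList sent_len_dic).getD k 0)
          (hist ++ [k]) (pvJoin (hist ++ [k]))) := by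
  rw [buildPermutationsRec]
  simp only [dite_eq_ite]
  rw [List.foldl_attach (l := (PySem.Dict.ofList sent_len_dic).keys)
    (f := fun (st : Bool × List String) k =>
      if k ∉ hist ∧ cl + (PySem.Dict.ofList sent_len_dic).getD k 0 ≤ 100 then
        (true, st.2 ++ buildPermutationsRec sent_len_dic
          (cl + (PySem.Dict.ofList sent_len_dic).getD k 0)
          (hist ++ [k]) (pvJoin (hist ++ [k])))
      else st) (b := (false, []))]
  rw [pv_foldl_flag, pv_K_eq_children]
  cases hE : (pvChildren (PySem.Dict.ofList sent_len_dic) cl hist).isEmpty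
  · simp
  · simp

-- the loop consumes the stack left to right, producing each state's recursive result
theorem pv_loop_eq (sent_len_dic : List (Int × Int)) :
    ∀ (n : ℕ) (stack : List (Int × List Int × String)) (acc : List String),
      pvMeasure (PySem.Dict.ofList sent_len_dic) stack = n →
      pvLoop (PySem.Dict.ofList sent_len_dic) stack acc
        = acc ++ stack.flatMap (fun e => buildPermutationsRec sent_len_dic e.1 e.2.1 e.2.2) := by
  intro n
  induction n using Nat.strong_induction_on with
  | _ n ih =>
  intro stack acc hn
  match stack with
  | [] => simp [pvLoop]
  | (cl, hist, s) :: rest =>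
    rw [pvLoop]
    cases hC : (pvChildren (PySem.Dict.ofList sent_len_dic) cl hist).isEmpty
    · -- children nonempty: push them (reversed) and continue
      simp only [Bool.false_eq_true, if_false]
      rw [pv_rev_push]
      have hlt := pv_measure_children_lt (PySem.Dict.ofList sent_len_dic) cl hist s rest
      rw [hn] at hlt
      rw [ih _ hlt _ acc rfl]
      rw [List.flatMap_cons, pv_A_eq sent_len_dic cl hist s]
      simp only [hC, Bool.false_eq_true, if_false]
      rw [List.flatMap_append, List.flatMap_map]
      simp [pvChild]
    · -- no children: emit s
      simp only [if_true]
      have hlt := pv_measure_tail_lt (PySem.Dict.ofList sent_len_dic) (cl, hist, s) rest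
      rw [hn] at hlt
      rw [ih _ hlt _ (acc ++ [s]) rfl]
      rw [List.flatMap_cons, pv_A_eq sent_len_dic cl hist s]
      simp [hC]

-- ===== VERDICT (by name: the statement is the Claim_ definition above) =====
theorem buildPermutationsRec_spec : Claim_equal_buildPermutationsRec := by
  intro sdl cl hist hs _
  unfold Spec_buildPermutationsRec buildPermutationsRec_alt
  rw [pv_loop_eq sdl _ _ [] rfl]
  simp
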